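-- pv_equiv track=rewrite | github.com/cksghkd123/algorithm | 백준부수기/17825_주사위윷놀이_백준.py | go_yut
-- ===== SOURCE A (Python) =====
-- def go_yut(where, dice):
--     if where == 35:
--         return 35, 0
--
--     if dice != 0:
--         return go_yut(yut_table[where][2], dice-1)
--
--     else:
--         if where == 5:
--             return 21, 10
--         elif where == 10:
--             return 25, 20
--         elif where == 15:
--             return 28, 30
--
--         return where, yut_table[where][1]
--
-- yut_table = [[0,0,1]] + [[i,2*i,i+1,False] for i in range(1,20)] + [[20,40,35,False]] + [[i+21, 3*i+10, i+22, False] for i in range(4)] + [[i+25, 2*i+20, i+26, False] for i in range(3)] + [[28, 30, 29, False]] + [[i+29, 28-i, i+30, False] for i in range(4)] + [[33, 30, 34, False]] + [[34, 35, 20, False]] + [[35, []]]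
-- ===== SOURCE B (Python) =====
-- def go_yut(where, dice):
--     path = [where]
--     while path[-1] != 35:
--         path.append(yut_table[path[-1]][2])
--     land = path[dice] if 0 <= dice < len(path) else 35
--     if land == 35:
--         return 35, 0
--     if land == 5:
--         return 21, 10
--     if land == 10:
--         return 25, 20
--     if land == 15:
--         return 28, 30
--     return land, yut_table[land][1]
--
-- yut_table = [[0,0,1]] + [[i,2*i,i+1,False] for i in range(1,20)] + [[20,40,35,False]] + [[i+21, 3*i+10, i+22, False] for i in range(4)] + [[i+25, 2*i+20, i+26, False] for i in range(3)] + [[28, 30, 29, False]] + [[i+29, 28-i, i+30, False] for i in range(4)] + [[33, 30, 34, False]] + [[34, 35, 20, False]] + [[35, []]]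
-- ===== Notes on version B (the rewrite author's own statement) =====
-- stated objective: alternative
-- what changed: A's tail recursion interleaving goal/dice checks with table steps is replaced by materializing the whole path from the start square to the goal as a list once, then selecting the landing square by a single index min-style lookup and scoring it in a separate terminal block.
-- outside the precondition, e.g. on go_yut(-1, 0): A returns (-1, []), B raises IndexError
import Mathlib
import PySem

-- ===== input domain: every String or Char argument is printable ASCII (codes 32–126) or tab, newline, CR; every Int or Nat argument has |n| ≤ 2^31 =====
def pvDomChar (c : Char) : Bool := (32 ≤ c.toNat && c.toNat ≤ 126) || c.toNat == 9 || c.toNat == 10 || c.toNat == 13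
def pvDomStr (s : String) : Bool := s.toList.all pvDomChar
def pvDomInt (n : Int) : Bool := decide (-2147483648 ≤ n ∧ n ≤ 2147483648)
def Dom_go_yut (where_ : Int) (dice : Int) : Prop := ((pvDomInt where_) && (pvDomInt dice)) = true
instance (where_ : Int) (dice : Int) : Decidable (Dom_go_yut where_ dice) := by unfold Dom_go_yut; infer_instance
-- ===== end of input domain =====

-- B materializes the path from the start square to the goal as a list once and selects the
-- landing square by one index lookup, instead of A's step-by-step tail recursion (objective:
-- alternative decomposition, same cost).

-- The module constant yut_table as (id, score, next) triples. Row 35's score slot is [] in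
-- Python (not an Int) and its next slot is absent; the triple (35, 0, 0) is a placeholder —
-- under Pre_go_yut that row's slots are never read (where_ = -1 is excluded and both programs
-- stop at square 35 before reading its row).
def yutTable : List (Int × Int × Int) :=
  [(0,0,1),
   (1,2,2),(2,4,3),(3,6,4),(4,8,5),(5,10,6),(6,12,7),(7,14,8),(8,16,9),(9,18,10),
   (10,20,11),(11,22,12),(12,24,13),(13,26,14),(14,28,15),(15,30,16),(16,32,17),
   (17,34,18),(18,36,19),(19,38,20),
   (20,40,35),
   (21,10,22),(22,13,23),(23,16,24),(24,19,25),
   (25,20,26),(26,22,27),(27,24,28),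
   (28,30,29),
   (29,28,30),(30,27,31),(31,26,32),(32,25,33),
   (33,30,34),
   (34,35,20),
   (35,0,0)]

-- ===== PORT A =====
-- A's recursion, made total with fuel (the fuel-out / bad-index values (0,0) are unreachable
-- under Pre_go_yut: each call decreases dice or walks the chain toward 35).
def go_yut_go : Nat → Int → Int → Int × Int
  | 0, _, _ => (0, 0)
  | f+1, w, d =>
    if w = 35 then (35, 0)
    else if d ≠ 0 then
      match PySem.List.pyGet? yutTable w with
      | some r => go_yut_go f r.2.2 (d - 1)
      | none => (0, 0)
    else
      if w = 5 then (21, 10)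
      else if w = 10 then (25, 20)
      else if w = 15 then (28, 30)
      else
        match PySem.List.pyGet? yutTable w with
        | some r => (w, r.2.1)
        | none => (0, 0)

def go_yut (where_ : Int) (dice : Int) : Int × Int :=
  go_yut_go (dice.toNat + 40) where_ dice

-- ===== PORT B =====
-- the while-loop 'while path[-1] != 35: path.append(yut_table[path[-1]][2])', fuel-bounded
-- (fuel-out / bad-index just stop the loop; unreachable under Pre_go_yut)
def yutBuild : Nat → List Int → List Int
  | 0, p => p
  | f+1, p =>
    if (PySem.List.pyGet? p (-1)).getD 35 ≠ 35 then
      match PySem.List.pyGet? yutTable ((PySem.List.pyGet? p (-1)).getD 35) with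
      | some r => yutBuild f (p ++ [r.2.2])
      | none => p
    else p

def go_yut_alt (where_ : Int) (dice : Int) : Int × Int :=
  let path := yutBuild 40 [where_]
  let land := if 0 ≤ dice ∧ dice < (path.length : Int)
              then (PySem.List.pyGet? path dice).getD 35 else 35
  if land = 35 then (35, 0)
  else if land = 5 then (21, 10)
  else if land = 10 then (25, 20)
  else if land = 15 then (28, 30)
  else
    match PySem.List.pyGet? yutTable land with
    | some r => (land, r.2.1)
    | none => (land, 0)

-- ===== PRECONDITION & SPEC =====
-- Pre_ excludes where_ outside [-36, 35] (A raises IndexError) and where_ = -1, where A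
-- raises IndexError for dice ≠ 0 and for dice = 0 returns (-1, []), which is not a pair of
-- integers (the [] comes from the degenerate last table row); B raises IndexError there.
def Pre_go_yut (where_ : Int) (dice : Int) : Prop :=
  -36 ≤ where_ ∧ where_ ≤ 35 ∧ where_ ≠ -1
instance (where_ : Int) (dice : Int) : Decidable (Pre_go_yut where_ dice) := by
  unfold Pre_go_yut; infer_instance

def pvWitness_go_yut : Int × Int := (0, 3)

def Spec_go_yut (where_ : Int) (dice : Int) (out : Int × Int) : Prop := out = go_yut_alt where_ dice
instance (where_ : Int) (dice : Int) (out : Int × Int) : Decidable (Spec_go_yut where_ dice out) := by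
  unfold Spec_go_yut; infer_instance

-- ===== CLAIM (what is proved, stated in full; the proofs are below) =====
def Claim_equal_go_yut : Prop := ∀ (where_ : Int) (dice : Int), Dom_go_yut where_ dice → Pre_go_yut where_ dice → Spec_go_yut where_ dice (go_yut where_ dice)

-- ===== LEMMAS AND PROOFS =====

-- squares-to-goal table, indexed like yut_table (36 rows; negative index wraps like Python's)
def yutDist : List Nat :=
  [21,20,19,18,17,16,15,14,13,12,11,10,9,8,7,6,5,4,3,2,1,
   15,14,13,12,11,10,9,8,7,6,5,4,3,2,0]

def yutDistGet (w : Int) : Nat := (PySem.List.pyGet? yutDist w).getD 0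

-- the successor square read from the table
def yutNxt (w : Int) : Int := ((PySem.List.pyGet? yutTable w).getD (0,0,0)).2.2

-- B's terminal scoring block as a named function (go_yut_alt's tail is literally this)
def yutFin (w : Int) : Int × Int :=
  if w = 35 then (35, 0)
  else if w = 5 then (21, 10)
  else if w = 10 then (25, 20)
  else if w = 15 then (28, 30)
  else
    match PySem.List.pyGet? yutTable w with
    | some r => (w, r.2.1)
    | none => (w, 0)

-- the common landing count and mid-level specification both ports are reduced to
def yutK (w d : Int) : Nat :=
  if d < 0 ∨ (yutDistGet w : Int) ≤ d then yutDistGet w else d.toNat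

def yutMid (w d : Int) : Int × Int := yutFin (yutNxt^[yutK w d] w)

abbrev yutValid (w : Int) : Prop := -36 ≤ w ∧ w ≤ 35 ∧ w ≠ -1

-- lift a per-index fact checked on the 72 in-range indices to any in-range Int
theorem yut_ofRange {P : Int → Prop} [DecidablePred P]
    (h : ∀ n : Nat, n < 72 → P ((n : Int) - 36)) {w : Int}
    (h1 : -36 ≤ w) (h2 : w ≤ 35) : P w := by
  have hw : w = ((w + 36).toNat : Int) - 36 := by omega
  rw [hw]; exact h _ (by omega)

-- one valid non-goal step: row exists, successor valid, distance drops by one; dist bound; dist 0 only at goal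
abbrev yutStepOK (w : Int) : Prop :=
  (w ≠ 35 → w ≠ -1 →
    (PySem.List.pyGet? yutTable w).isSome = true ∧
    yutValid (yutNxt w) ∧
    yutDistGet w = yutDistGet (yutNxt w) + 1) ∧
  yutDistGet w ≤ 39 ∧ (w ≠ -1 → yutDistGet w = 0 → w = 35)

theorem yutStepOK_all : ∀ n : Nat, n < 72 → yutStepOK ((n : Int) - 36) := by decide

theorem yutStepOK_of_valid {w : Int} (h : yutValid w) :
    (w ≠ 35 →
      (PySem.List.pyGet? yutTable w).isSome = true ∧
      yutValid (yutNxt w) ∧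
      yutDistGet w = yutDistGet (yutNxt w) + 1) ∧
    yutDistGet w ≤ 39 ∧ (yutDistGet w = 0 → w = 35) := by
  have hs := yut_ofRange (P := yutStepOK) yutStepOK_all h.1 h.2.1
  exact ⟨fun h35 => hs.1 h35 h.2.2, hs.2.1, hs.2.2 h.2.2⟩

-- A's recursion computes yutMid
theorem go_yut_go_eq_mid : ∀ (f : Nat) (w d : Int),
    yutValid w → d.toNat + yutDistGet w + 1 ≤ f →
    go_yut_go f w d = yutMid w d := by
  intro f
  induction f with
  | zero => intro w d _ hf; omega
  | succ f ih =>
    intro w d hv hf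
    obtain ⟨hstep, hbd, h0⟩ := yutStepOK_of_valid hv
    by_cases hw : w = 35
    · subst hw
      have hd35 : yutDistGet 35 = 0 := by decide
      have hk : yutK 35 d = 0 := by
        simp only [yutK, hd35]; split
        · rfl
        · omega
      simp [go_yut_go, yutMid, hk, yutFin]
    · obtain ⟨hsome, hvn, hdist⟩ := hstep hw
      rcases hg : PySem.List.pyGet? yutTable w with _ | r
      · rw [hg] at hsome; simp at hsome
      · have hr : r.2.2 = yutNxt w := by simp [yutNxt, hg]
        by_cases hd : d = 0
        · subst hd
          have hk : yutK w 0 = 0 := by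
            simp only [yutK]; rw [if_neg]; · rfl
            · omega
          simp only [go_yut_go, hw]
          simp only [yutMid, hk, Function.iterate_zero, id_eq, yutFin, hw, hg]
          simp
        · have heq : go_yut_go f r.2.2 (d - 1) = yutMid r.2.2 (d - 1) := by
            rw [hr]; exact ih _ _ hvn (by omega)
          have hmid : yutMid r.2.2 (d - 1) = yutMid w d := by
            rw [hr]
            have hkk : yutK w d = yutK (yutNxt w) (d - 1) + 1 := by
              simp only [yutK]
              rw [hdist]
              by_cases hlt : d < 0
              · rw [if_pos (Or.inl hlt), if_pos (Or.inl (by omega))]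
              · by_cases hge : (yutDistGet (yutNxt w) : Int) + 1 ≤ d
                · rw [if_pos (by push_cast; omega), if_pos (by omega)]
                · rw [if_neg (by push_cast; omega), if_neg (by omega)]; omega
            simp only [yutMid, hkk, Function.iterate_succ_apply]
          rw [← hmid, ← heq]
          simp [go_yut_go, hw, hd, hg]

-- unrolling one step of the iterate chain listing
theorem yut_map_iter_range (g : Int → Int) (v : Int) (n : Nat) :
    (List.range (n+1)).map (fun k => g^[k] v) = v :: (List.range n).map (fun k => g^[k] (g v)) := by
  rw [List.range_succ_eq_map]
  simp [List.map_map, Function.comp_def, Function.iterate_succ_apply]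

-- the path builder materializes the iterate chain
theorem yutBuild_spec : ∀ (f : Nat) (v : Int), yutValid v → yutDistGet v ≤ f →
    ∀ acc : List Int,
    yutBuild f (acc ++ [v]) = acc ++ (List.range (yutDistGet v + 1)).map (fun k => yutNxt^[k] v) := by
  intro f
  induction f with
  | zero =>
    intro v hv hf acc
    have h0 : yutDistGet v = 0 := by omega
    have h35 := (yutStepOK_of_valid hv).2.2 h0
    simp [yutBuild, h0]
  | succ f ih =>
    intro v hv hf acc
    obtain ⟨hstep, hbd, h0⟩ := yutStepOK_of_valid hv
    by_cases h35 : v = 35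
    · subst h35
      have hd0 : yutDistGet (35:Int) = 0 := by decide
      simp [yutBuild, PySem.List.pyGet?_neg_one_append_singleton, hd0]
    · obtain ⟨hsome, hvn, hdist⟩ := hstep h35
      rcases hg : PySem.List.pyGet? yutTable v with _ | r
      · rw [hg] at hsome; simp at hsome
      · have hr : r.2.2 = yutNxt v := by simp [yutNxt, hg]
        have hb : yutBuild (f+1) (acc ++ [v])
            = yutBuild f ((acc ++ [v]) ++ [yutNxt v]) := by
          simp [yutBuild, PySem.List.pyGet?_neg_one_append_singleton, h35, hg, hr]
        rw [hb, ih (yutNxt v) hvn (by omega) (acc ++ [v])]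
        rw [hdist, List.append_assoc,
          yut_map_iter_range yutNxt v (yutDistGet (yutNxt v) + 1)]
        simp

-- the chain reaches the goal in exactly yutDistGet steps
theorem yutIter_dist : ∀ (f : Nat) (w : Int), yutValid w → yutDistGet w ≤ f →
    yutNxt^[yutDistGet w] w = 35 := by
  intro f
  induction f with
  | zero =>
    intro w hv hf
    have h0 : yutDistGet w = 0 := by omega
    have h35 := (yutStepOK_of_valid hv).2.2 h0
    rw [h0, Function.iterate_zero]
    simpa using h35
  | succ f ih =>
    intro w hv hf
    obtain ⟨hstep, hbd, h0⟩ := yutStepOK_of_valid hv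
    by_cases h35 : w = 35
    · subst h35
      have hd0 : yutDistGet (35:Int) = 0 := by decide
      simp [hd0]
    · obtain ⟨hsome, hvn, hdist⟩ := hstep h35
      rw [hdist, Function.iterate_succ_apply]
      exact ih _ hvn (by omega)

-- B computes yutMid
theorem go_yut_alt_eq_mid (w d : Int) (hv : yutValid w) :
    go_yut_alt w d = yutMid w d := by
  obtain ⟨hstep, hbd, h0⟩ := yutStepOK_of_valid hv
  have hpath : yutBuild 40 [w]
      = (List.range (yutDistGet w + 1)).map (fun k => yutNxt^[k] w) := by
    simpa using yutBuild_spec 40 w hv (by omega) []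
  have hland : (if 0 ≤ d ∧ d < ((((List.range (yutDistGet w + 1)).map (fun k => yutNxt^[k] w)).length : Nat) : Int)
      then (PySem.List.pyGet? ((List.range (yutDistGet w + 1)).map (fun k => yutNxt^[k] w)) d).getD 35 else 35)
      = yutNxt^[yutK w d] w := by
    simp only [List.length_map, List.length_range]
    by_cases hr : 0 ≤ d ∧ d < ((yutDistGet w + 1 : Nat) : Int)
    · obtain ⟨hd0, hdlt'⟩ := hr
      have hdlt : d.toNat < yutDistGet w + 1 := by push_cast at hdlt'; omega
      rw [if_pos ⟨hd0, hdlt'⟩, PySem.List.pyGet?_of_nonneg _ hd0]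
      have hk : yutK w d = d.toNat := by
        simp only [yutK]
        by_cases heq : (yutDistGet w : Int) ≤ d
        · rw [if_pos (Or.inr heq)]; push_cast at hdlt'; omega
        · rw [if_neg (by omega)]
      have hget : ((List.range (yutDistGet w + 1)).map (fun k => yutNxt^[k] w))[d.toNat]?
          = some (yutNxt^[d.toNat] w) := by
        rw [List.getElem?_map, List.getElem?_range hdlt]; rfl
      rw [hk, hget]; rfl
    · rw [if_neg hr]
      have hk : yutK w d = yutDistGet w := by
        simp only [yutK]; rw [if_pos]; push_cast at hr; omega
      rw [hk, yutIter_dist 40 w hv (by omega)]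
  show yutFin (if 0 ≤ d ∧ d < (((yutBuild 40 [w]).length : Nat) : Int)
      then (PySem.List.pyGet? (yutBuild 40 [w]) d).getD 35 else 35) = yutMid w d
  rw [hpath, hland]
  rfl

-- ===== VERDICT (by name: the statement is the Claim_ definition above) =====
theorem go_yut_spec : Claim_equal_go_yut := by
  intro w d _ hpre
  have hv : yutValid w := hpre
  obtain ⟨-, hbd, -⟩ := yutStepOK_of_valid hv
  unfold Spec_go_yut go_yut
  rw [go_yut_go_eq_mid (d.toNat + 40) w d hv (by omega), go_yut_alt_eq_mid w d hv]
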